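-- pv_equiv track=rewrite | github.com/Shemnei/AdventOfCode_Python | src/d13/firewall.py | firewall_two
-- ===== SOURCE A (Python) =====
-- def firewall_two(layers: dict) -> int:
--     delay = 0
--
--     while True:
--         caught = False
--         ticks = delay
--         last_layer = 0
--         for k, v in layers.items():
--             ticks += (k - last_layer)
--             last_layer = k
--             iteration, scanner_layer_pos = divmod(ticks, v - 1)
--             if iteration % 2 == 1:
--                 scanner_layer_pos = v - scanner_layer_pos
--             if scanner_layer_pos == 0:
--                 caught = True
--                 break
--         if not caught:
--             break
--         delay += 1
--
--     return delay
-- ===== SOURCE B (Python) =====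
-- def scanner_pos(t, v):
--     # position of the bouncing scanner of a depth-v layer after t picoseconds
--     trips, rem = divmod(t, v - 1)
--     return v - rem if trips % 2 else rem
--
--
-- def firewall_two(layers: dict) -> int:
--     # Sieve delays in fixed-size blocks, layer by layer: each layer filters the
--     # whole block's survivor mask at once, then the first surviving delay wins.
--     BLOCK = 64
--     start = 0
--     while True:
--         safe = [True] * BLOCK
--         for k, v in layers.items():
--             safe = [ok and scanner_pos(start + i + k, v) != 0
--                     for i, ok in enumerate(safe)]
--         for i, ok in enumerate(safe):
--             if ok:
--                 return start + i
--         start += BLOCK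
-- ===== Notes on version B (the rewrite author's own statement) =====
-- stated objective: alternative
-- what changed: Inverts the loop nest: instead of A's delay-by-delay scan that re-simulates every scanner with a threaded ticks/last_layer accumulator and an early break, B sieves delays in fixed 64-wide blocks layer-major -- each layer filters the whole block's survivor mask in one stateless pass (scanner position computed directly from start+i+k), and the first surviving delay of a block is the answer. …
import Mathlib
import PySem

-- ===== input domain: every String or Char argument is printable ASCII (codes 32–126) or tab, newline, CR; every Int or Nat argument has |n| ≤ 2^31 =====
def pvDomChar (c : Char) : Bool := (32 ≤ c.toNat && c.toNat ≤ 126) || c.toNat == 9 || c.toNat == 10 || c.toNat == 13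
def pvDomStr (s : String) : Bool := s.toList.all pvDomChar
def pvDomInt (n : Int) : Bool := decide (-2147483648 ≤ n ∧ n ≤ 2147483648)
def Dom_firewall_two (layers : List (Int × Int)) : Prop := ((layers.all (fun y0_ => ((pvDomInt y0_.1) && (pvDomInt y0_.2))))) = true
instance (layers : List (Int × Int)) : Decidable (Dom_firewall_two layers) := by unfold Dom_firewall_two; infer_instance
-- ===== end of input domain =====

-- B sieves delays in 64-wide blocks layer-major (each layer filters the whole block's
-- survivor mask at once) instead of A's delay-major scan with a threaded ticks accumulator.

-- totality guard shared by both fuelled loops: the catch pattern is periodic in the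
-- delay with period dividing this product, so under Pre_ the fuel is never exhausted
def pvPeriodBound (layers : List (Int × Int)) : Nat :=
  layers.foldl (fun a kv => a * (2 * (kv.2 - 1)).natAbs) 1

-- ===== PORT A =====
-- the inner `for k, v in layers.items()` loop with its running ticks/last_layer
-- state and early break; `divmod` ported by PySem floordiv/mod (Pre_ keeps v ≠ 1)
def firewallInner : List (Int × Int) → Int → Int → Bool
  | [], _, _ => false
  | (k, v) :: rest, ticks, last_layer =>
    let ticks' := ticks + (k - last_layer)
    let iteration := PySem.Int.floordiv ticks' (v - 1)
    let pos := PySem.Int.mod ticks' (v - 1)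
    let pos' := if PySem.Int.mod iteration 2 = 1 then v - pos else pos
    if pos' = 0 then true else firewallInner rest ticks' k

-- the `while True` search over delays (fuel = totality guard only)
def firewallFuel (layers : List (Int × Int)) : Nat → Int → Int
  | 0, delay => delay
  | fuel + 1, delay =>
    if firewallInner layers delay 0 then firewallFuel layers fuel (delay + 1) else delay

def firewall_two (layers : List (Int × Int)) : Int :=
  firewallFuel layers (pvPeriodBound layers + 1) 0

-- ===== PORT B =====
-- `trips, rem = divmod(t, v - 1); return v - rem if trips % 2 else rem`
def scannerPos (t v : Int) : Int :=
  let trips := PySem.Int.floordiv t (v - 1)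
  let rem := PySem.Int.mod t (v - 1)
  if PySem.Int.mod trips 2 = 1 then v - rem else rem

-- one layer filtering the block's survivor mask:
-- `safe = [ok and scanner_pos(start + i + k, v) != 0 for i, ok in enumerate(safe)]`
def blockStep (start : Int) (safe : List Bool) (kv : Int × Int) : List Bool :=
  (PySem.List.enumerate safe 0).map
    (fun p => p.2 && decide (scannerPos (start + p.1 + kv.1) kv.2 ≠ 0))

-- `safe = [True] * BLOCK` then the `for k, v in layers.items()` filtering pass
def blockSafe (layers : List (Int × Int)) (start : Int) : List Bool :=
  layers.foldl (blockStep start) (List.replicate 64 true)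

-- the `while True` block loop: first surviving delay of the block, else next block
def altLoop (layers : List (Int × Int)) : Nat → Int → Int
  | 0, start => start
  | fuel + 1, start =>
    match (PySem.List.enumerate (blockSafe layers start) 0).find? (fun p => p.2) with
    | some p => start + p.1
    | none => altLoop layers fuel (start + 64)

def firewall_two_alt (layers : List (Int × Int)) : Int :=
  altLoop layers (pvPeriodBound layers + 1) 0

-- ===== PRECONDITION & SPEC =====
-- Pre_ = exactly the inputs on which Python A returns: v = 1 reaches divmod(_, 0) and
-- raises ZeroDivisionError, and if every delay is caught the while-True loop never
-- returns; since the catch pattern is periodic in the delay with period dividing the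
-- product of the per-layer periods, "some delay escapes" = "some delay below that
-- product escapes" (a layer catches delay d iff (d+k) % (2(v-1)) is 0, or also
-- ≡ 1 % (2(v-1)) when v ≤ 0).
def Pre_firewall_two (layers : List (Int × Int)) : Prop :=
  (∀ kv ∈ layers, kv.2 ≠ 1) ∧
  ∃ d < pvPeriodBound layers, ∀ kv ∈ layers,
    ¬ (PySem.Int.mod ((d : Int) + kv.1) (2 * (kv.2 - 1)) = 0 ∨
       (kv.2 ≤ 0 ∧ PySem.Int.mod ((d : Int) + kv.1) (2 * (kv.2 - 1)) =
          PySem.Int.mod 1 (2 * (kv.2 - 1))))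
-- decision helpers for Pre_: an early-exit linear search for the escaping delay
-- (the ∃ above, decided bottom-up so it computes on concrete inputs)
def pvSafeAt (layers : List (Int × Int)) (d : Int) : Bool :=
  layers.all (fun kv =>
    !(decide (PySem.Int.mod (d + kv.1) (2 * (kv.2 - 1)) = 0) ||
      (decide (kv.2 ≤ 0) &&
        decide (PySem.Int.mod (d + kv.1) (2 * (kv.2 - 1)) = PySem.Int.mod 1 (2 * (kv.2 - 1))))))

def pvSearch (layers : List (Int × Int)) : Nat → Int → Bool
  | 0, _ => false
  | f + 1, d => pvSafeAt layers d || pvSearch layers f (d + 1)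

instance (layers : List (Int × Int)) : Decidable (Pre_firewall_two layers) :=
  decidable_of_iff
    ((layers.all (fun kv => kv.2 != 1) && pvSearch layers (pvPeriodBound layers) 0) = true)
    (by
      have hsearch : ∀ (f : Nat) (d0 : Int),
          pvSearch layers f d0 = true ↔ ∃ j : Nat, j < f ∧ pvSafeAt layers (d0 + j) = true := by
        intro f
        induction f with
        | zero => intro d0; simp [pvSearch]
        | succ n ih =>
          intro d0
          simp only [pvSearch, Bool.or_eq_true, ih (d0 + 1)]
          constructor
          · rintro (h | ⟨j, hj, hs⟩)
            · exact ⟨0, by omega, by simpa using h⟩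
            · exact ⟨j + 1, by omega, by rw [show d0 + ((j + 1 : Nat) : Int) = d0 + 1 + j from by push_cast; ring]; exact hs⟩
          · rintro ⟨j, hj, hs⟩
            rcases Nat.eq_zero_or_pos j with rfl | hpos
            · exact Or.inl (by simpa using hs)
            · refine Or.inr ⟨j - 1, by omega, ?_⟩
              rw [show d0 + 1 + ((j - 1 : Nat) : Int) = d0 + j from by
                push_cast [Nat.cast_sub hpos]; ring]
              exact hs
      have hsafe : ∀ d : Int, pvSafeAt layers d = true ↔ ∀ kv ∈ layers,
          ¬ (PySem.Int.mod (d + kv.1) (2 * (kv.2 - 1)) = 0 ∨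
             (kv.2 ≤ 0 ∧ PySem.Int.mod (d + kv.1) (2 * (kv.2 - 1)) =
                PySem.Int.mod 1 (2 * (kv.2 - 1)))) := by
        intro d
        simp only [pvSafeAt, List.all_eq_true, Bool.not_eq_eq_eq_not, Bool.not_true,
          Bool.or_eq_false_iff, Bool.and_eq_false_iff, decide_eq_false_iff_not,
          not_or, not_and, Prod.forall]
        constructor
        · intro h a b hab
          have := h a b hab
          exact ⟨this.1, fun hb => by
            rcases this.2 with h' | h'
            · exact absurd hb h'
            · exact h'⟩
        · intro h a b hab
          have := h a b hab
          refine ⟨this.1, ?_⟩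
          by_cases hb : b ≤ 0
          · exact Or.inr (this.2 hb)
          · exact Or.inl hb
      unfold Pre_firewall_two
      rw [Bool.and_eq_true, hsearch (pvPeriodBound layers) 0, List.all_eq_true]
      constructor
      · rintro ⟨h1, j, hj, hs⟩
        refine ⟨fun kv hkv => by simpa using h1 kv hkv, j, hj, ?_⟩
        have := (hsafe _).mp hs
        simpa using this
      · rintro ⟨h1, j, hj, hs⟩
        exact ⟨fun kv hkv => by simpa using h1 kv hkv,
          j, hj, (hsafe _).mpr (by simpa using hs)⟩)

def pvWitness_firewall_two : (List (Int × Int)) := [(0, 3)]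

def Spec_firewall_two (layers : List (Int × Int)) (out : Int) : Prop := out = firewall_two_alt layers
instance (layers : List (Int × Int)) (out : Int) : Decidable (Spec_firewall_two layers out) := by unfold Spec_firewall_two; infer_instance

-- ===== CLAIM (what is proved, stated in full; the proofs are below) =====
def Claim_equal_firewall_two : Prop := ∀ (layers : List (Int × Int)), Dom_firewall_two layers → Pre_firewall_two layers → Spec_firewall_two layers (firewall_two layers)

-- ===== LEMMAS AND PROOFS =====

-- "some layer catches the packet at delay d" (the stateless form of A's inner loop)
def caughtAt (layers : List (Int × Int)) (d : Int) : Bool :=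
  layers.any (fun kv => decide (scannerPos (d + kv.1) kv.2 = 0))

-- uniqueness of Python's floored remainder
theorem pymod_unique (a b c s : Int) (h : a = c * b + s)
    (h1 : 0 < b → 0 ≤ s ∧ s < b) (h2 : b < 0 → b < s ∧ s ≤ 0) :
    PySem.Int.mod a b = s := by
  have hd := PySem.Int.floordiv_mul_add_mod a b
  set q := PySem.Int.floordiv a b with hq
  set r := PySem.Int.mod a b with hr
  have key : r - s = (c - q) * b := by
    have hh : q * b + r = c * b + s := by rw [hd, h]
    nlinarith [hh]
  rcases lt_trichotomy b 0 with hb | hb | hb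
  · have hbnd := PySem.Int.mod_neg_bounds a hb
    rw [← hr] at hbnd
    have hs := h2 hb
    rcases lt_trichotomy (c - q) 0 with hcq | hcq | hcq
    · nlinarith
    · rw [hcq, zero_mul] at key; omega
    · nlinarith
  · rw [hb, mul_zero] at key; omega
  · have hbnd1 := PySem.Int.mod_nonneg a hb
    have hbnd2 := PySem.Int.mod_lt a hb
    rw [← hr] at hbnd1 hbnd2
    have hs := h1 hb
    rcases lt_trichotomy (c - q) 0 with hcq | hcq | hcq
    · nlinarith
    · rw [hcq, zero_mul] at key; omega
    · nlinarith

-- the double-modulus identity behind the divmod + parity test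
theorem pymod_double (t m : Int) :
    PySem.Int.mod t (2 * m) =
      PySem.Int.mod (PySem.Int.floordiv t m) 2 * m + PySem.Int.mod t m := by
  have h1 := PySem.Int.floordiv_mul_add_mod t m
  have h2 := PySem.Int.floordiv_mul_add_mod (PySem.Int.floordiv t m) 2
  set q := PySem.Int.floordiv t m with hq
  set r := PySem.Int.mod t m with hr
  set c := PySem.Int.floordiv q 2 with hc
  set e := PySem.Int.mod q 2 with he
  have hee : e = 0 ∨ e = 1 := by
    have := PySem.Int.mod_nonneg q (by norm_num : (0:Int) < 2)
    have := PySem.Int.mod_lt q (by norm_num : (0:Int) < 2)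
    omega
  have hrb : (0 < m → 0 ≤ r ∧ r < m) ∧ (m < 0 → m < r ∧ r ≤ 0) := by
    constructor
    · intro h
      exact ⟨by rw [hr]; exact PySem.Int.mod_nonneg t h, by rw [hr]; exact PySem.Int.mod_lt t h⟩
    · intro h
      have := PySem.Int.mod_neg_bounds t h
      rw [← hr] at this; omega
  apply pymod_unique t (2 * m) c (e * m + r)
  · have : q = c * 2 + e := by omega
    calc t = q * m + r := h1.symm
    _ = (c * 2 + e) * m + r := by rw [← this]
    _ = c * (2 * m) + (e * m + r) := by ring
  · intro h2m
    have hmpos : 0 < m := by omega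
    have := hrb.1 hmpos
    rcases hee with h | h <;> rw [h] <;> constructor <;> omega
  · intro h2m
    have hmneg : m < 0 := by omega
    have := hrb.2 hmneg
    rcases hee with h | h <;> rw [h] <;> constructor <;> omega

-- Python's 1 % (2*m) for negative cycle length
theorem pymod_one_neg (m : Int) (hm : m ≤ -1) : PySem.Int.mod 1 (2 * m) = 2 * m + 1 := by
  apply pymod_unique 1 (2 * m) (-1) (2 * m + 1) (by ring) <;> intro h <;> omega

-- the divmod-bounce zero test in closed modular form, layer by layer
theorem hit_iff (t v : Int) (hv : v ≠ 1) :
    scannerPos t v = 0 ↔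
    (PySem.Int.mod t (2 * (v - 1)) = 0 ∨
      (v ≤ 0 ∧ PySem.Int.mod t (2 * (v - 1)) = PySem.Int.mod 1 (2 * (v - 1)))) := by
  simp only [scannerPos]
  have hm : v - 1 ≠ 0 := by omega
  have hd := pymod_double t (v - 1)
  set q := PySem.Int.floordiv t (v - 1) with hq
  set r := PySem.Int.mod t (v - 1) with hr
  set e := PySem.Int.mod q 2 with he
  have hee : e = 0 ∨ e = 1 := by
    have := PySem.Int.mod_nonneg q (by norm_num : (0:Int) < 2)
    have := PySem.Int.mod_lt q (by norm_num : (0:Int) < 2)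
    omega
  have hrb : (0 < v - 1 → 0 ≤ r ∧ r < v - 1) ∧ (v - 1 < 0 → v - 1 < r ∧ r ≤ 0) := by
    constructor
    · intro h
      exact ⟨by rw [hr]; exact PySem.Int.mod_nonneg t h, by rw [hr]; exact PySem.Int.mod_lt t h⟩
    · intro h
      have := PySem.Int.mod_neg_bounds t h
      rw [← hr] at this; omega
  rcases le_or_gt v 0 with hv0 | hv0
  · have hone := pymod_one_neg (v - 1) (by omega)
    have hb := hrb.2 (by omega)
    rw [hd, hone]
    rcases hee with h | h <;> rw [h] <;> split_ifs <;> omega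
  · have hv2 : 2 ≤ v := by omega
    have hb := hrb.1 (by omega)
    rw [hd]
    rcases hee with h | h <;> rw [h] <;> split_ifs <;> omega

-- (if P then true else b) = (decide P || b), to linearise A's break
theorem if_true_or (P : Prop) [Decidable P] (b : Bool) :
    (if P then true else b) = (decide P || b) := by
  split_ifs with h <;> simp [h]

-- the threaded ticks/last_layer state telescopes: A's inner loop is caughtAt
theorem inner_eq_caught (layers : List (Int × Int)) (ticks last : Int) :
    firewallInner layers ticks last = caughtAt layers (ticks - last) := by
  induction layers generalizing ticks last with
  | nil => simp [firewallInner, caughtAt]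
  | cons kv rest ih =>
    obtain ⟨k, v⟩ := kv
    simp only [firewallInner, caughtAt, List.any_cons]
    rw [if_true_or, ih (ticks + (k - last)) k]
    have h1 : ticks + (k - last) - k = ticks - last := by ring
    have h2 : ticks - last + k = ticks + (k - last) := by ring
    rw [h1, h2]
    rfl

-- A's fuelled delay scan returns d + j for the least safe offset j (if in fuel)
theorem fuelA_eq (layers : List (Int × Int)) :
    ∀ (f : Nat) (d : Int) (j : Nat), j < f →
      (∀ j' < j, caughtAt layers (d + j') = true) →
      caughtAt layers (d + j) = false →
      firewallFuel layers f d = d + j := by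
  intro f
  induction f with
  | zero => omega
  | succ n ih =>
    intro d j hj hall hsafe
    simp only [firewallFuel]
    rw [inner_eq_caught, sub_zero]
    rcases Nat.eq_zero_or_pos j with h0 | hpos
    · subst h0
      simp only [Nat.cast_zero, add_zero] at hsafe
      rw [hsafe]
      simp
    · have hc : caughtAt layers d = true := by
        have := hall 0 hpos
        simpa using this
      rw [hc]
      simp only [if_true]
      have := ih (d + 1) (j - 1) (by omega)
        (fun j' hj' => by
          have := hall (j' + 1) (by omega)
          rw [show d + 1 + (j' : Int) = d + ((j' + 1 : Nat) : Int) from by push_cast; ring]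
          exact this)
        (by
          rw [show d + 1 + ((j - 1 : Nat) : Int) = d + (j : Int) from by
            have : (1:Int) ≤ j := by exact_mod_cast hpos
            push_cast [Nat.cast_sub hpos]; ring]
          exact hsafe)
      rw [this]
      have : (1:Int) ≤ j := by exact_mod_cast hpos
      push_cast [Nat.cast_sub hpos]
      ring

-- one filtering pass, pointwise
theorem blockStep_getElem? (start : Int) (safe : List Bool) (kv : Int × Int) (i : Nat) :
    (blockStep start safe kv)[i]? =
      safe[i]?.map (fun ok => ok && decide (scannerPos (start + i + kv.1) kv.2 ≠ 0)) := by
  unfold blockStep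
  rw [List.getElem?_map, PySem.List.getElem?_enumerate]
  cases h : safe[i]? <;> simp

-- the whole layer fold, pointwise
theorem foldl_blockStep_getElem? (L : List (Int × Int)) :
    ∀ (safe : List Bool) (start : Int) (i : Nat),
      (L.foldl (blockStep start) safe)[i]? =
        safe[i]?.map (fun ok => ok && !caughtAt L (start + i)) := by
  induction L with
  | nil =>
    intro safe start i
    cases h : safe[i]? <;> simp [caughtAt, h]
  | cons kv rest ih =>
    intro safe start i
    simp only [List.foldl_cons]
    rw [ih, blockStep_getElem?]
    cases h : safe[i]? with
    | none => simp
    | some ok =>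
      simp only [Option.map_some]
      congr 1
      simp only [caughtAt, List.any_cons, Bool.not_or, ← Bool.and_assoc, decide_not]

-- B's survivor mask, pointwise
theorem blockSafe_getElem? (layers : List (Int × Int)) (start : Int) (i : Nat) :
    (blockSafe layers start)[i]? =
      (List.replicate 64 true)[i]?.map (fun ok => ok && !caughtAt layers (start + i)) := by
  unfold blockSafe
  exact foldl_blockStep_getElem? layers _ start i

-- find? over the enumerated mask: the first true index
theorem find_enum_some (l : List Bool) :
    ∀ (s : Int) (j : Nat) (hj : j < l.length), l[j] = true →
      (∀ i (h : i < j), l[i]'(h.trans hj) = false) →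
      (PySem.List.enumerate l s).find? (fun p => p.2) = some (s + j, true) := by
  induction l with
  | nil => intro s j hj _ _; simp at hj
  | cons x xs ih =>
    intro s j hj hx hmin
    rw [PySem.List.enumerate_cons]
    rcases Nat.eq_zero_or_pos j with h0 | hpos
    · subst h0
      simp only [List.getElem_cons_zero] at hx
      subst hx
      simp [List.find?_cons_of_pos]
    · have hx0 : x = false := by simpa using hmin 0 hpos
      subst hx0
      rw [List.find?_cons_of_neg (by simp)]
      have hj' : j - 1 < xs.length := by simp at hj; omega
      have hget : xs[j - 1]'hj' = true := by
        have : (false :: xs)[j]'hj = xs[j - 1]'hj' := by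
          rcases Nat.exists_eq_add_of_lt hpos with ⟨j', rfl⟩
          simp [List.getElem_cons_succ]
        rw [← this]; exact hx
      have hmin' : ∀ i (h : i < j - 1), xs[i]'(h.trans hj') = false := by
        intro i hi
        have := hmin (i + 1) (by omega)
        simpa using this
      rw [ih (s + 1) (j - 1) hj' hget hmin']
      congr 2
      have : (1:Int) ≤ (j:Int) := by exact_mod_cast hpos
      push_cast [Nat.cast_sub hpos]
      ring

theorem find_enum_none (l : List Bool) :
    ∀ (s : Int), (∀ i (h : i < l.length), l[i] = false) →
      (PySem.List.enumerate l s).find? (fun p => p.2) = none := by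
  induction l with
  | nil => intro s _; simp [PySem.List.enumerate_nil]
  | cons x xs ih =>
    intro s hall
    have hx : x = false := by simpa using hall 0 (by simp)
    subst hx
    rw [PySem.List.enumerate_cons, List.find?_cons_of_neg (by simp)]
    exact ih (s + 1) (fun i hi => by simpa using hall (i + 1) (by simpa using Nat.succ_lt_succ hi))

-- the mask has length 64
theorem blockSafe_length (layers : List (Int × Int)) (start : Int) :
    (blockSafe layers start).length = 64 := by
  unfold blockSafe
  suffices h : ∀ (L : List (Int × Int)) (safe : List Bool),
      (L.foldl (blockStep start) safe).length = safe.length by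
    simpa using h layers (List.replicate 64 true)
  intro L
  induction L with
  | nil => intro safe; rfl
  | cons kv rest ih =>
    intro safe
    simp only [List.foldl_cons]
    rw [ih]
    unfold blockStep
    rw [List.length_map, PySem.List.length_enumerate]

-- the mask, as getElem
theorem blockSafe_getElem (layers : List (Int × Int)) (start : Int) (i : Nat)
    (hi : i < (blockSafe layers start).length) :
    (blockSafe layers start)[i] = !caughtAt layers (start + i) := by
  have h64 : i < 64 := by rw [blockSafe_length] at hi; exact hi
  have h := blockSafe_getElem? layers start i
  rw [List.getElem?_eq_getElem hi, List.getElem?_replicate] at h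
  simp only [if_pos h64, Option.map_some, Bool.true_and] at h
  exact Option.some.inj h

-- B's fuelled block loop returns the least safe delay (if in fuel)
theorem fuelB_eq (layers : List (Int × Int)) (N : Nat)
    (hN : caughtAt layers N = false) (hmin : ∀ m < N, caughtAt layers m = true) :
    ∀ (f b : Nat), 64 * b ≤ N → N < 64 * b + 64 * f →
      altLoop layers f (64 * b) = N := by
  intro f
  induction f with
  | zero => omega
  | succ n ih =>
    intro b hlo hhi
    simp only [altLoop]
    by_cases hcase : N < 64 * b + 64
    · set j := N - 64 * b with hj
      have hjlt : j < (blockSafe layers (64 * b)).length := by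
        rw [blockSafe_length]; omega
      have hcast : 64 * (b : Int) + (j : Int) = (N : Int) := by omega
      have hget : (blockSafe layers (64 * b))[j] = true := by
        rw [blockSafe_getElem _ _ _ hjlt, hcast, hN]; rfl
      have hmin' : ∀ i (h : i < j), (blockSafe layers (64 * b))[i]'(h.trans hjlt) = false := by
        intro i hi
        rw [blockSafe_getElem]
        have hc : 64 * (b : Int) + (i : Int) = ((64 * b + i : Nat) : Int) := by omega
        rw [hc, hmin (64 * b + i) (by omega)]
        rfl
      rw [find_enum_some _ _ j hjlt hget hmin']
      show 64 * (b : Int) + (0 + (j : Int)) = (N : Int)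
      omega
    · have hall : ∀ i (h : i < (blockSafe layers (64 * b)).length),
          (blockSafe layers (64 * b))[i] = false := by
        intro i hi
        have h64 : i < 64 := by rw [blockSafe_length] at hi; exact hi
        rw [blockSafe_getElem]
        have hc : 64 * (b : Int) + (i : Int) = ((64 * b + i : Nat) : Int) := by omega
        rw [hc, hmin (64 * b + i) (by omega)]
        rfl
      rw [find_enum_none _ _ hall]
      have hc : 64 * (b : Int) + 64 = 64 * ((b + 1 : Nat) : Int) := by omega
      rw [hc]
      exact ih (b + 1) (by omega) (by omega)

-- Pre_'s closed modular condition at d = "no layer catches at delay d"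
theorem pre_safe_caught (layers : List (Int × Int)) (hv : ∀ kv ∈ layers, kv.2 ≠ 1)
    (d : Int)
    (h : ∀ kv ∈ layers,
      ¬ (PySem.Int.mod (d + kv.1) (2 * (kv.2 - 1)) = 0 ∨
         (kv.2 ≤ 0 ∧ PySem.Int.mod (d + kv.1) (2 * (kv.2 - 1)) =
            PySem.Int.mod 1 (2 * (kv.2 - 1))))) :
    caughtAt layers d = false := by
  unfold caughtAt
  rw [List.any_eq_false]
  intro kv hkv
  simp only [decide_eq_true_eq]
  intro hzero
  exact h kv hkv ((hit_iff (d + kv.1) kv.2 (hv kv hkv)).mp hzero)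

-- ===== VERDICT (by name: the statement is the Claim_ definition above) =====
theorem firewall_two_spec : Claim_equal_firewall_two := by
  intro layers _ hpre
  obtain ⟨hv, d, hd, hdsafe⟩ := hpre
  have hex : ∃ n : Nat, caughtAt layers (n : Int) = false :=
    ⟨d, pre_safe_caught layers hv d hdsafe⟩
  set N := Nat.find hex with hNdef
  have hN : caughtAt layers (N : Int) = false := Nat.find_spec hex
  have hmin : ∀ m < N, caughtAt layers (m : Int) = true := by
    intro m hm
    have := Nat.find_min hex hm
    simpa using this
  have hNd : N ≤ d := Nat.find_min' hex (pre_safe_caught layers hv d hdsafe)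
  unfold Spec_firewall_two firewall_two firewall_two_alt
  have hA : firewallFuel layers (pvPeriodBound layers + 1) 0 = (N : Int) := by
    rw [fuelA_eq layers (pvPeriodBound layers + 1) 0 N (by omega)
      (fun j' hj' => by simpa using hmin j' hj')
      (by simpa using hN)]
    omega
  have hB : altLoop layers (pvPeriodBound layers + 1) 0 = (N : Int) := by
    have h0 : (0 : Int) = 64 * ((0 : Nat) : Int) := by norm_num
    rw [h0, fuelB_eq layers N hN hmin (pvPeriodBound layers + 1) 0 (by omega) (by omega)]
  rw [hA, hB]
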